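-- pv_equiv track=rewrite | github.com/dfporter/FBF_gendered_gl | orthos/language.py | collapse_list_of_paired_sets
-- ===== SOURCE A (Python) =====
-- def collapse_list_of_paired_sets(_t):
--     collapsed = []
--
--     def update_row(a, b, row):
--         if a & row[0]:
--             collapsed[n][0] |= a
--             collapsed[n][1] |= b
--             return True
--         elif b & row[1]:
--             collapsed[n][0] |= a
--             collapsed[n][1] |= b
--             return True
--         return False
--
--     for _a, _b in _t:
--
--         found = False
--
--         for n, _row in enumerate(collapsed):
--             if (not found) and update_row(_a, _b, _row):
--                 found = True
--             if found:
--                 break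
--
--         if not found:
--             collapsed.append([_a, _b])
--
--     return collapsed
-- ===== SOURCE B (Python) =====
-- def collapse_list_of_paired_sets(_t):
--     # Alternative algorithm: element->least-row-index maps per column replace the per-pair row scan.
--     collapsed = []
--     idx0 = {}  # element -> least row index whose first set contains it
--     idx1 = {}  # element -> least row index whose second set contains it
--     for _a, _b in _t:
--         cands = [idx0[e] for e in _a if e in idx0] + [idx1[e] for e in _b if e in idx1]
--         if cands:
--             n = min(cands)
--             collapsed[n][0] |= _a
--             collapsed[n][1] |= _b
--         else:
--             n = len(collapsed)
--             collapsed.append([_a, _b])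
--         for e in _a:
--             if e not in idx0 or idx0[e] > n:
--                 idx0[e] = n
--         for e in _b:
--             if e not in idx1 or idx1[e] > n:
--                 idx1[e] = n
--     return collapsed
-- ===== Notes on version B (the rewrite author's own statement) =====
-- stated objective: alternative
-- what changed: Replaces A's per-pair scan over all collapsed rows (re-intersecting every row's two sets) with two maps from element to the least row index containing it, so each pair is placed by direct lookups of its own elements and a min over the hit indices; same observable behaviour, different traversal and maintained state.
import Mathlib
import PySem

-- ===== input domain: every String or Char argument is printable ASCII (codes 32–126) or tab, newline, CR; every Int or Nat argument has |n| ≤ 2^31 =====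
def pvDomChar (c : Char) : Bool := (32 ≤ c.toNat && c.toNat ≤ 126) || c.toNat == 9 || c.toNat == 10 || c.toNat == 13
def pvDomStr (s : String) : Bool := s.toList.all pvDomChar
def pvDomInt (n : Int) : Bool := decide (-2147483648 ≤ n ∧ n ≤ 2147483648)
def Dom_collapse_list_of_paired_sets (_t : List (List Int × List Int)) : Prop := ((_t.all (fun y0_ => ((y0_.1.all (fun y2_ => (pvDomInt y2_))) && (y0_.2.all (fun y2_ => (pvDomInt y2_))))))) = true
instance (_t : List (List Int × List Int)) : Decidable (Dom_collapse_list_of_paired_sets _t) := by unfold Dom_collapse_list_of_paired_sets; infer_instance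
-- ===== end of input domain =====

-- B replaces A's per-pair scan over the collapsed rows by two element→least-row-index maps (alternative algorithm; not measured faster on the generated inputs).


-- rows are the 2-element lists [set0, set1]; row[0] / row[1]
def pvCol0 (row : List (List Int)) : List Int := PySem.List.pyGetD row 0 []
def pvCol1 (row : List (List Int)) : List Int := PySem.List.pyGetD row 1 []

-- ===== PORT A =====
-- update_row's test: 'a & row[0]' or (elif) 'b & row[1]' non-empty
def pvMatchA (a b : List Int) (row : List (List Int)) : Bool :=
  !(PySem.Set.inter a (pvCol0 row)).isEmpty || !(PySem.Set.inter b (pvCol1 row)).isEmpty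

-- collapsed[n][0] |= a ; collapsed[n][1] |= b  (the updated row)
def pvMergeRow (a b : List Int) (row : List (List Int)) : List (List Int) :=
  [PySem.Set.union (pvCol0 row) a, PySem.Set.union (pvCol1 row) b]

-- the 'for n, _row in enumerate(collapsed)' scan with break on first found;
-- none = not found, some = collapsed after the in-place merge
def pvALoop (a b : List Int) : List (List (List Int)) → Option (List (List (List Int)))
  | [] => none
  | row :: rest =>
    if pvMatchA a b row then some (pvMergeRow a b row :: rest)
    else (pvALoop a b rest).map (row :: ·)

def collapse_list_of_paired_sets (_t : List (List Int × List Int)) : List (List (List Int)) :=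
  _t.foldl (fun collapsed ab =>
    match pvALoop ab.1 ab.2 collapsed with
    | some c => c
    | none => collapsed ++ [[ab.1, ab.2]]) []

-- ===== PORT B =====
-- collapsed[n][0] |= _a ; collapsed[n][1] |= _b  at position n
def pvSetAt (a b : List Int) : Nat → List (List (List Int)) → List (List (List Int))
  | _, [] => []
  | 0, row :: rest => [PySem.Set.union (pvCol0 row) a, PySem.Set.union (pvCol1 row) b] :: rest
  | n+1, row :: rest => row :: pvSetAt a b n rest

-- for e in xs: if e not in d or d[e] > n: d[e] = n
def pvBump (d : PySem.Dict Int Int) (xs : List Int) (n : Int) : PySem.Dict Int Int :=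
  xs.foldl (fun d e =>
    match d.get? e with
    | none => d.insert e n
    | some m => if n < m then d.insert e n else d) d

def pvBStep (st : List (List (List Int)) × PySem.Dict Int Int × PySem.Dict Int Int)
    (ab : List Int × List Int) :
    List (List (List Int)) × PySem.Dict Int Int × PySem.Dict Int Int :=
  let cands := ab.1.filterMap st.2.1.get? ++ ab.2.filterMap st.2.2.get?
  match PySem.List.min? cands (fun x => x) with
  | some n => (pvSetAt ab.1 ab.2 n.toNat st.1, pvBump st.2.1 ab.1 n, pvBump st.2.2 ab.2 n)
  | none =>
      ((st.1 ++ [[ab.1, ab.2]]), pvBump st.2.1 ab.1 (st.1.length : Int),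
        pvBump st.2.2 ab.2 (st.1.length : Int))

def collapse_list_of_paired_sets_alt (_t : List (List Int × List Int)) : List (List (List Int)) :=
  (_t.foldl pvBStep ([], PySem.Dict.empty, PySem.Dict.empty)).1

-- ===== PRECONDITION & SPEC =====
def Spec_collapse_list_of_paired_sets (_t : List (List Int × List Int)) (out : List (List (List Int))) : Prop := out = collapse_list_of_paired_sets_alt _t
instance (_t : List (List Int × List Int)) (out : List (List (List Int))) : Decidable (Spec_collapse_list_of_paired_sets _t out) := by unfold Spec_collapse_list_of_paired_sets; infer_instance

-- ===== CLAIM (what is proved, stated in full; the proofs are below) =====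
def Claim_equal_collapse_list_of_paired_sets : Prop := ∀ (_t : List (List Int × List Int)), Dom_collapse_list_of_paired_sets _t → Spec_collapse_list_of_paired_sets _t (collapse_list_of_paired_sets _t)

-- ===== LEMMAS AND PROOFS =====

-- least row index whose column 0 (resp. 1) contains e
def pvLeast0 (cs : List (List (List Int))) (e : Int) : Option Nat :=
  cs.findIdx? (fun row => (pvCol0 row).contains e)
def pvLeast1 (cs : List (List (List Int))) (e : Int) : Option Nat :=
  cs.findIdx? (fun row => (pvCol1 row).contains e)

-- B's map invariant: each map sends e to the least row index containing e in its column
def pvInv (cs : List (List (List Int))) (d0 d1 : PySem.Dict Int Int) : Prop :=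
  (∀ e, d0.get? e = (pvLeast0 cs e).map (fun n => (n : Int))) ∧
  (∀ e, d1.get? e = (pvLeast1 cs e).map (fun n => (n : Int)))

lemma pvMatchA_iff (a b : List Int) (row : List (List Int)) :
    pvMatchA a b row = true ↔ (∃ e ∈ a, e ∈ pvCol0 row) ∨ (∃ e ∈ b, e ∈ pvCol1 row) := by
  simp [pvMatchA, PySem.Set.inter]

lemma pvALoop_eq (a b : List Int) (cs : List (List (List Int))) :
    pvALoop a b cs = (cs.findIdx? (pvMatchA a b)).map (fun n => pvSetAt a b n cs) := by
  induction cs with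
  | nil => rfl
  | cons row rest ih =>
    by_cases h : pvMatchA a b row
    · simp [pvALoop, List.findIdx?_cons, h, pvSetAt, pvMergeRow]
    · cases hfi : List.findIdx? (pvMatchA a b) rest <;>
        simp [pvALoop, List.findIdx?_cons, h, ih, hfi, pvSetAt]

lemma pvSetAt_eq_set (a b : List Int) :
    ∀ (n : Nat) (cs : List (List (List Int))) (h : n < cs.length),
      pvSetAt a b n cs = cs.set n (pvMergeRow a b (cs[n]'h)) := by
  intro n
  induction n with
  | zero => intro cs h; cases cs with
    | nil => simp at h
    | cons row rest => simp [pvSetAt, pvMergeRow]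
  | succ k ih => intro cs h; cases cs with
    | nil => simp at h
    | cons row rest => simp [pvSetAt, ih rest (by simpa using h)]

lemma findIdx?_set_eq {α : Type} (p : α → Bool) :
    ∀ (cs : List α) (n : Nat) (r : α) (h : n < cs.length), p r = p (cs[n]'h) →
      (cs.set n r).findIdx? p = cs.findIdx? p := by
  intro cs
  induction cs with
  | nil => intro n r h; simp at h
  | cons x rest ih =>
    intro n r h hp
    cases n with
    | zero => simp only [List.set_cons_zero, List.findIdx?_cons]; simp at hp; rw [hp]
    | succ k =>
      simp only [List.set_cons_succ, List.findIdx?_cons]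
      rw [ih k r (by simpa using h) (by simpa using hp)]

lemma pvBump_get? (n : Int) :
    ∀ (xs : List Int) (d : PySem.Dict Int Int),
      (∀ e ∈ xs, ∀ m, d.get? e = some m → n ≤ m) →
      ∀ e, (pvBump d xs n).get? e = if e ∈ xs then some n else d.get? e := by
  intro xs
  induction xs with
  | nil => intro d _ e; simp [pvBump]
  | cons x rest ih =>
    intro d hd e
    have step :
        (pvBump d (x :: rest) n) =
          pvBump (match d.get? x with
            | none => d.insert x n
            | some m => if n < m then d.insert x n else d) rest n := rfl
    set d1 := (match d.get? x with
            | none => d.insert x n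
            | some m => if n < m then d.insert x n else d) with hd1
    have hx : d1.get? x = some n := by
      rcases hg : d.get? x with _ | m
      · simp [hd1, hg, PySem.Dict.get?_insert_self]
      · have hnm := hd x (by simp) m hg
        by_cases hlt : n < m
        · simp [hd1, hg, hlt, PySem.Dict.get?_insert_self]
        · have : m = n := le_antisymm (by omega) hnm
          simp [hd1, hg, this]
    have hne : ∀ e', e' ≠ x → d1.get? e' = d.get? e' := by
      intro e' he'
      rcases hg : d.get? x with _ | m
      · simp [hd1, hg, PySem.Dict.get?_insert_of_ne _ _ he']
      · by_cases hlt : n < m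
        · simp [hd1, hg, hlt, PySem.Dict.get?_insert_of_ne _ _ he']
        · simp [hd1, hg, hlt]
    have hd1h : ∀ e' ∈ rest, ∀ m, d1.get? e' = some m → n ≤ m := by
      intro e' he' m hm
      by_cases hex : e' = x
      · subst hex; rw [hx] at hm; simp at hm; omega
      · exact hd e' (by simp [he']) m (by rw [hne e' hex] at hm; exact hm)
    rw [step, ih d1 hd1h e]
    by_cases hr : e ∈ rest
    · simp [hr]
    · by_cases hex : e = x
      · subst hex; simp [hr, hx]
      · simp [hr, hex, hne e hex]

lemma pvLeast0_some (cs : List (List (List Int))) (e : Int) (k : Nat)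
    (h : pvLeast0 cs e = some k) :
    ∃ hk : k < cs.length, e ∈ pvCol0 (cs[k]'hk) ∧
      ∀ j (hj : j < k), e ∉ pvCol0 (cs[j]'(hj.trans hk)) := by
  obtain ⟨hk, hc, hm⟩ := List.findIdx?_eq_some_iff_getElem.mp h
  exact ⟨hk, by simpa using hc, fun j hj hmem => hm j hj (by simpa using hmem)⟩

lemma pvLeast1_some (cs : List (List (List Int))) (e : Int) (k : Nat)
    (h : pvLeast1 cs e = some k) :
    ∃ hk : k < cs.length, e ∈ pvCol1 (cs[k]'hk) ∧
      ∀ j (hj : j < k), e ∉ pvCol1 (cs[j]'(hj.trans hk)) := by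
  obtain ⟨hk, hc, hm⟩ := List.findIdx?_eq_some_iff_getElem.mp h
  exact ⟨hk, by simpa using hc, fun j hj hmem => hm j hj (by simpa using hmem)⟩

lemma min_cands_eq (a b : List Int) (cs : List (List (List Int)))
    (d0 d1 : PySem.Dict Int Int) (h : pvInv cs d0 d1) :
    PySem.List.min? (a.filterMap d0.get? ++ b.filterMap d1.get?) (fun x => x)
      = (cs.findIdx? (pvMatchA a b)).map (fun n => (n : Int)) := by
  obtain ⟨h0, h1⟩ := h
  have hmemc : ∀ v : Int, v ∈ a.filterMap d0.get? ++ b.filterMap d1.get? ↔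
      ((∃ e ∈ a, d0.get? e = some v) ∨ (∃ e ∈ b, d1.get? e = some v)) := by
    intro v; simp [List.mem_filterMap]
  -- every candidate is a (cast) index of a matching row
  have hcand : ∀ v ∈ a.filterMap d0.get? ++ b.filterMap d1.get?,
      ∃ (k : Nat) (hk : k < cs.length), v = (k : Int) ∧ pvMatchA a b (cs[k]'hk) = true := by
    intro v hv
    rcases (hmemc v).mp hv with ⟨e, he, hg⟩ | ⟨e, he, hg⟩
    · rw [h0 e] at hg
      rcases hk0 : pvLeast0 cs e with _ | k <;> rw [hk0] at hg <;> simp at hg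
      obtain ⟨hk, hc, _⟩ := pvLeast0_some cs e k hk0
      exact ⟨k, hk, hg.symm, (pvMatchA_iff a b _).mpr (Or.inl ⟨e, he, hc⟩)⟩
    · rw [h1 e] at hg
      rcases hk0 : pvLeast1 cs e with _ | k <;> rw [hk0] at hg <;> simp at hg
      obtain ⟨hk, hc, _⟩ := pvLeast1_some cs e k hk0
      exact ⟨k, hk, hg.symm, (pvMatchA_iff a b _).mpr (Or.inr ⟨e, he, hc⟩)⟩
  cases hf : cs.findIdx? (pvMatchA a b) with
  | none =>
    have hnone := List.findIdx?_eq_none_iff.mp hf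
    have hnil : a.filterMap d0.get? ++ b.filterMap d1.get? = [] := by
      rcases hne : a.filterMap d0.get? ++ b.filterMap d1.get? with _ | ⟨v, rest⟩
      · rfl
      · obtain ⟨k, hk, _, hm⟩ := hcand v (by rw [hne]; exact List.mem_cons_self ..)
        exact absurd (hnone _ (List.getElem_mem hk)) (by simp [hm])
    rw [hnil]; rfl
  | some n =>
    obtain ⟨hn, hpn, hmin⟩ := List.findIdx?_eq_some_iff_getElem.mp hf
    have hnc : (n : Int) ∈ a.filterMap d0.get? ++ b.filterMap d1.get? := by
      rcases (pvMatchA_iff a b _).mp hpn with ⟨e, he, hc⟩ | ⟨e, he, hc⟩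
      · have hl : pvLeast0 cs e = some n := by
          apply List.findIdx?_eq_some_iff_getElem.mpr
          refine ⟨hn, by simpa using hc, fun j hj hcj => ?_⟩
          exact hmin j hj ((pvMatchA_iff a b _).mpr (Or.inl ⟨e, he, by simpa using hcj⟩))
        exact (hmemc _).mpr (Or.inl ⟨e, he, by rw [h0 e, hl]; rfl⟩)
      · have hl : pvLeast1 cs e = some n := by
          apply List.findIdx?_eq_some_iff_getElem.mpr
          refine ⟨hn, by simpa using hc, fun j hj hcj => ?_⟩
          exact hmin j hj ((pvMatchA_iff a b _).mpr (Or.inr ⟨e, he, by simpa using hcj⟩))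
        exact (hmemc _).mpr (Or.inr ⟨e, he, by rw [h1 e, hl]; rfl⟩)
    have hlb : ∀ v ∈ a.filterMap d0.get? ++ b.filterMap d1.get?, (n : Int) ≤ v := by
      intro v hv
      obtain ⟨k, hk, rfl, hm⟩ := hcand v hv
      have hkn : ¬ k < n := fun hlt => by simpa [hm] using hmin k hlt
      exact_mod_cast Nat.le_of_not_lt hkn
    rcases hmq : PySem.List.min? (a.filterMap d0.get? ++ b.filterMap d1.get?) (fun x => x)
        with _ | m
    · rw [PySem.List.min?_eq_none_iff] at hmq
      rw [hmq] at hnc; simp at hnc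
    · have hub := PySem.List.min?_isMin hmq _ hnc
      have hge := hlb m (PySem.List.min?_mem hmq)
      rw [le_antisymm hub hge]
      rfl

lemma pvCol0_pair (x y : List Int) : pvCol0 [x, y] = x := rfl
lemma pvCol1_pair (x y : List Int) : pvCol1 [x, y] = y := rfl
lemma pvCol0_merge (a b : List Int) (row : List (List Int)) :
    pvCol0 (pvMergeRow a b row) = PySem.Set.union (pvCol0 row) a := rfl
lemma pvCol1_merge (a b : List Int) (row : List (List Int)) :
    pvCol1 (pvMergeRow a b row) = PySem.Set.union (pvCol1 row) b := rfl

lemma pvLeast0_append (cs : List (List (List Int))) (a b : List Int) (e : Int) :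
    pvLeast0 (cs ++ [[a, b]]) e
      = (pvLeast0 cs e).or (if e ∈ a then some cs.length else none) := by
  simp only [pvLeast0, List.findIdx?_append, List.findIdx?_cons, pvCol0_pair]
  by_cases he : e ∈ a <;> simp [he]

lemma pvLeast1_append (cs : List (List (List Int))) (a b : List Int) (e : Int) :
    pvLeast1 (cs ++ [[a, b]]) e
      = (pvLeast1 cs e).or (if e ∈ b then some cs.length else none) := by
  simp only [pvLeast1, List.findIdx?_append, List.findIdx?_cons, pvCol1_pair]
  by_cases he : e ∈ b <;> simp [he]

lemma step_main (ab : List Int × List Int) (cs : List (List (List Int)))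
    (d0 d1 : PySem.Dict Int Int) (h : pvInv cs d0 d1) :
    (pvBStep (cs, d0, d1) ab).1
        = (match pvALoop ab.1 ab.2 cs with
            | some x => x
            | none => cs ++ [[ab.1, ab.2]])
      ∧ pvInv (pvBStep (cs, d0, d1) ab).1 (pvBStep (cs, d0, d1) ab).2.1
          (pvBStep (cs, d0, d1) ab).2.2 := by
  obtain ⟨h0, h1⟩ := h
  have hbs : pvBStep (cs, d0, d1) ab =
      (match PySem.List.min? (ab.1.filterMap d0.get? ++ ab.2.filterMap d1.get?) (fun x => x) with
      | some n => (pvSetAt ab.1 ab.2 n.toNat cs, pvBump d0 ab.1 n, pvBump d1 ab.2 n)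
      | none => ((cs ++ [[ab.1, ab.2]]), pvBump d0 ab.1 (cs.length : Int),
          pvBump d1 ab.2 (cs.length : Int))) := rfl
  rw [hbs, min_cands_eq ab.1 ab.2 cs d0 d1 ⟨h0, h1⟩, pvALoop_eq]
  cases hf : cs.findIdx? (pvMatchA ab.1 ab.2) with
  | none =>
    have hno0 : ∀ e ∈ ab.1, d0.get? e = none := by
      intro e he
      rw [h0 e]
      rcases hk0 : pvLeast0 cs e with _ | k
      · rfl
      · obtain ⟨hk, hc, _⟩ := pvLeast0_some cs e k hk0
        have hfa := List.findIdx?_eq_none_iff.mp hf _ (List.getElem_mem hk)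
        exact absurd hfa (by simp [(pvMatchA_iff ab.1 ab.2 _).mpr (Or.inl ⟨e, he, hc⟩)])
    have hno1 : ∀ e ∈ ab.2, d1.get? e = none := by
      intro e he
      rw [h1 e]
      rcases hk0 : pvLeast1 cs e with _ | k
      · rfl
      · obtain ⟨hk, hc, _⟩ := pvLeast1_some cs e k hk0
        have hfa := List.findIdx?_eq_none_iff.mp hf _ (List.getElem_mem hk)
        exact absurd hfa (by simp [(pvMatchA_iff ab.1 ab.2 _).mpr (Or.inr ⟨e, he, hc⟩)])
    refine ⟨rfl, ?_, ?_⟩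
    · intro e
      show (pvBump d0 ab.1 (cs.length : Int)).get? e
          = (pvLeast0 (cs ++ [[ab.1, ab.2]]) e).map (fun n => (n : Int))
      rw [pvBump_get? _ ab.1 d0 (fun e he m hm => absurd hm (by simp [hno0 e he])) e,
        pvLeast0_append]
      by_cases he : e ∈ ab.1
      · have hl0 : pvLeast0 cs e = none := by
          have := hno0 e he; rw [h0 e] at this
          rcases hk0 : pvLeast0 cs e with _ | k
          · rfl
          · rw [hk0] at this; simp at this
        simp [he, hl0]
      · simp [he, h0 e]
    · intro e
      show (pvBump d1 ab.2 (cs.length : Int)).get? e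
          = (pvLeast1 (cs ++ [[ab.1, ab.2]]) e).map (fun n => (n : Int))
      rw [pvBump_get? _ ab.2 d1 (fun e he m hm => absurd hm (by simp [hno1 e he])) e,
        pvLeast1_append]
      by_cases he : e ∈ ab.2
      · have hl1 : pvLeast1 cs e = none := by
          have := hno1 e he; rw [h1 e] at this
          rcases hk0 : pvLeast1 cs e with _ | k
          · rfl
          · rw [hk0] at this; simp at this
        simp [he, hl1]
      · simp [he, h1 e]
  | some n =>
    obtain ⟨hn, hpn, hmin⟩ := List.findIdx?_eq_some_iff_getElem.mp hf
    have hge0 : ∀ e ∈ ab.1, ∀ m, d0.get? e = some m → (n : Int) ≤ m := by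
      intro e he m hm
      rw [h0 e] at hm
      rcases hk0 : pvLeast0 cs e with _ | k <;> rw [hk0] at hm <;> simp at hm
      obtain ⟨hk, hc, _⟩ := pvLeast0_some cs e k hk0
      have hmatch := (pvMatchA_iff ab.1 ab.2 _).mpr (Or.inl ⟨e, he, hc⟩)
      have hkn : ¬ k < n := fun hlt => by simpa [hmatch] using hmin k hlt
      rw [← hm]; exact_mod_cast Nat.le_of_not_lt hkn
    have hge1 : ∀ e ∈ ab.2, ∀ m, d1.get? e = some m → (n : Int) ≤ m := by
      intro e he m hm
      rw [h1 e] at hm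
      rcases hk0 : pvLeast1 cs e with _ | k <;> rw [hk0] at hm <;> simp at hm
      obtain ⟨hk, hc, _⟩ := pvLeast1_some cs e k hk0
      have hmatch := (pvMatchA_iff ab.1 ab.2 _).mpr (Or.inr ⟨e, he, hc⟩)
      have hkn : ¬ k < n := fun hlt => by simpa [hmatch] using hmin k hlt
      rw [← hm]; exact_mod_cast Nat.le_of_not_lt hkn
    have hset : pvSetAt ab.1 ab.2 ((n : Int).toNat) cs
        = cs.set n (pvMergeRow ab.1 ab.2 (cs[n]'hn)) := by
      rw [Int.toNat_natCast, pvSetAt_eq_set ab.1 ab.2 n cs hn]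
    refine ⟨?_, ?_, ?_⟩
    · show pvSetAt ab.1 ab.2 ((n : Int)).toNat cs = pvSetAt ab.1 ab.2 n cs
      rw [Int.toNat_natCast]
    · intro e
      show (pvBump d0 ab.1 (n : Int)).get? e
          = (pvLeast0 (pvSetAt ab.1 ab.2 ((n : Int).toNat) cs) e).map (fun n => (n : Int))
      rw [hset, pvBump_get? _ ab.1 d0 hge0 e]
      by_cases he : e ∈ ab.1
      · have hl : pvLeast0 (cs.set n (pvMergeRow ab.1 ab.2 (cs[n]'hn))) e = some n := by
          apply List.findIdx?_eq_some_iff_getElem.mpr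
          refine ⟨by simpa using hn, ?_, ?_⟩
          · rw [List.getElem_set_self]
            simp [pvCol0_merge, PySem.Set.mem_union, he]
          · intro j hj
            rw [List.getElem_set_ne (Nat.ne_of_lt hj).symm]
            intro hcj
            exact hmin j hj
              ((pvMatchA_iff ab.1 ab.2 _).mpr (Or.inl ⟨e, he, by simpa using hcj⟩))
        simp [he, hl]
      · have hl : pvLeast0 (cs.set n (pvMergeRow ab.1 ab.2 (cs[n]'hn))) e = pvLeast0 cs e := by
          apply findIdx?_set_eq _ cs n _ hn
          simp [pvCol0_merge, PySem.Set.mem_union, he]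
        simp [he, hl, h0 e]
    · intro e
      show (pvBump d1 ab.2 (n : Int)).get? e
          = (pvLeast1 (pvSetAt ab.1 ab.2 ((n : Int).toNat) cs) e).map (fun n => (n : Int))
      rw [hset, pvBump_get? _ ab.2 d1 hge1 e]
      by_cases he : e ∈ ab.2
      · have hl : pvLeast1 (cs.set n (pvMergeRow ab.1 ab.2 (cs[n]'hn))) e = some n := by
          apply List.findIdx?_eq_some_iff_getElem.mpr
          refine ⟨by simpa using hn, ?_, ?_⟩
          · rw [List.getElem_set_self]
            simp [pvCol1_merge, PySem.Set.mem_union, he]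
          · intro j hj
            rw [List.getElem_set_ne (Nat.ne_of_lt hj).symm]
            intro hcj
            exact hmin j hj
              ((pvMatchA_iff ab.1 ab.2 _).mpr (Or.inr ⟨e, he, by simpa using hcj⟩))
        simp [he, hl]
      · have hl : pvLeast1 (cs.set n (pvMergeRow ab.1 ab.2 (cs[n]'hn))) e = pvLeast1 cs e := by
          apply findIdx?_set_eq _ cs n _ hn
          simp [pvCol1_merge, PySem.Set.mem_union, he]
        simp [he, hl, h1 e]

lemma fold_eq :
    ∀ (t : List (List Int × List Int)) (cs : List (List (List Int)))
      (d0 d1 : PySem.Dict Int Int), pvInv cs d0 d1 →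
      (t.foldl pvBStep (cs, d0, d1)).1
        = t.foldl (fun collapsed ab =>
            match pvALoop ab.1 ab.2 collapsed with
            | some x => x
            | none => collapsed ++ [[ab.1, ab.2]]) cs := by
  intro t
  induction t with
  | nil => intro cs d0 d1 _; rfl
  | cons ab rest ih =>
    intro cs d0 d1 h
    obtain ⟨h1, h2⟩ := step_main ab cs d0 d1 h
    have hst : pvBStep (cs, d0, d1) ab
        = ((pvBStep (cs, d0, d1) ab).1, (pvBStep (cs, d0, d1) ab).2.1,
            (pvBStep (cs, d0, d1) ab).2.2) := rfl
    calc (List.foldl pvBStep (pvBStep (cs, d0, d1) ab) rest).1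
        = List.foldl (fun collapsed ab =>
            match pvALoop ab.1 ab.2 collapsed with
            | some x => x
            | none => collapsed ++ [[ab.1, ab.2]]) (pvBStep (cs, d0, d1) ab).1 rest := by
          rw [hst]; exact ih _ _ _ h2
      _ = _ := by rw [List.foldl_cons, h1]

-- ===== VERDICT (by name: the statement is the Claim_ definition above) =====
theorem collapse_list_of_paired_sets_spec : Claim_equal_collapse_list_of_paired_sets := by
  intro _t _
  unfold Spec_collapse_list_of_paired_sets
  unfold collapse_list_of_paired_sets collapse_list_of_paired_sets_alt
  rw [fold_eq _ [] PySem.Dict.empty PySem.Dict.empty]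
  constructor <;> intro e <;> simp [pvLeast0, pvLeast1, PySem.Dict.get?, PySem.Dict.empty]
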